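-- pv_equiv track=rewrite | github.com/kshitijalwadhi/COL764_Assignments | Assignment 1/invidx_cons.py | getVocab_old
-- ===== SOURCE A (Python) =====
-- def getVocab_old(data, stopwords):
--     tokens = []
--     for doc, token_list in data.items():
--         tokens += token_list
--     tokens = set(tokens)
--     for w in stopwords:
--         tokens.discard(w)
--     return tokens
-- ===== SOURCE B (Python) =====
-- def getVocab_old(data, stopwords):
--     # One ordered symbol table with a keep-flag: stopwords are pre-seeded False,
--     # tokens claim an entry (True) only if the word is not already present.
--     status = {}
--     for w in stopwords:
--         status[w] = False
--     for token_list in data.values():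
--         for t in token_list:
--             status.setdefault(t, True)
--     return {t for t, keep in status.items() if keep}
-- ===== Notes on version B (the rewrite author's own statement) =====
-- stated objective: alternative
-- what changed: Replaces A's set-union-then-discard with a single ordered symbol table carrying a keep-flag: stopwords are pre-seeded False, tokens claim entries via setdefault(t, True), and the vocabulary is read off the True-flagged items, so no set is built from all tokens and no removal pass exists.
import Mathlib
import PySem

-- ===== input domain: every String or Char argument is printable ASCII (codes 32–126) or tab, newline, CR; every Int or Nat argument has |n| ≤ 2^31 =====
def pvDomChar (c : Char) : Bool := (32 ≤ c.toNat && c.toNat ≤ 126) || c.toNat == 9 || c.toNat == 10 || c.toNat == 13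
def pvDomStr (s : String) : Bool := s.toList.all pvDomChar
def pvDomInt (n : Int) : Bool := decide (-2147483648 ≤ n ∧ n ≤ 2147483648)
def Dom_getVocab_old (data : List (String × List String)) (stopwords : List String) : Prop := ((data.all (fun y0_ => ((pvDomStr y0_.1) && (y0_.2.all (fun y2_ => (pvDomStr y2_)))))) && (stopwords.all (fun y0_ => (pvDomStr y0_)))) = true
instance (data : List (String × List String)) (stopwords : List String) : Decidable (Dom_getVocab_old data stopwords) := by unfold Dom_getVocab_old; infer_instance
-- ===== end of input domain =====

-- B replaces A's set-union-then-discard with one ordered symbol table carrying a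
-- keep-flag (stopwords pre-seeded False, tokens claim entries via setdefault)
-- and reads the vocabulary off the True-flagged items (objective: alternative).

-- ===== PORT A =====
def getVocab_old (data : List (String × List String)) (stopwords : List String) : List String :=
  let tokens := data.foldl (fun acc p => acc ++ p.2) []
  let tokens := PySem.Set.ofList tokens
  stopwords.foldl (fun s w => PySem.Set.discard s w) tokens

-- ===== PORT B =====
def getVocab_old_alt (data : List (String × List String)) (stopwords : List String) : List String :=
  let status := stopwords.foldl (fun d w => d.insert w false) (PySem.Dict.empty : PySem.Dict String Bool)
  let status := data.foldl (fun d p =>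
      p.2.foldl (fun d t => PySem.Dict.setdefault d t true) d) status
  PySem.Set.ofList ((status.items.filter (fun kv => kv.2)).map (fun kv => kv.1))

-- ===== PRECONDITION & SPEC =====
def Spec_getVocab_old (data : List (String × List String)) (stopwords : List String) (out : List String) : Prop := out = getVocab_old_alt data stopwords
instance (data : List (String × List String)) (stopwords : List String) (out : List String) : Decidable (Spec_getVocab_old data stopwords out) := by unfold Spec_getVocab_old; infer_instance

-- ===== CLAIM (what is proved, stated in full; the proofs are below) =====
def Claim_equal_getVocab_old : Prop := ∀ (data : List (String × List String)) (stopwords : List String), Dom_getVocab_old data stopwords → Spec_getVocab_old data stopwords (getVocab_old data stopwords)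

-- ===== LEMMAS AND PROOFS =====

-- Set.contains on set(xs) agrees with list membership test
theorem pv_contains_ofList (xs : List String) (y : String) :
    List.contains (PySem.Set.ofList xs) y = List.contains xs y := by
  rw [Bool.eq_iff_iff]
  simp [PySem.Set.mem_ofList]

-- A's discard loop is a filter by non-membership in stopwords
theorem pv_foldl_discard (sw : List String) :
    ∀ s : List String, sw.foldl (fun s w => PySem.Set.discard s w) s
      = s.filter (fun x => !sw.contains x) := by
  induction sw with
  | nil => intro s; simp
  | cons w ws ih =>
      intro s
      rw [List.foldl_cons, ih]
      simp only [PySem.Set.discard, List.filter_filter]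
      apply List.filter_congr
      intro y _
      by_cases h : y = w <;> simp [h]

-- A's token-concatenation loop flattens data's value lists
theorem pv_concat_flat (data : List (String × List String)) :
    ∀ acc : List String,
      data.foldl (fun a p => a ++ p.2) acc = acc ++ data.flatMap (fun p => p.2) := by
  induction data with
  | nil => intro acc; simp
  | cons d ds ih => intro acc; simp [List.foldl_cons, ih]

-- seeding loop: the status dict after the stopword pass lists the distinct
-- stopwords, each flagged false
theorem pv_seed_items (sw : List String) :
    ∀ (S : List String) (d : PySem.Dict String Bool),
      d.items = S.map (fun w => (w, false)) →
      (sw.foldl (fun d w => d.insert w false) d).items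
        = (PySem.Set.update S sw).map (fun w => (w, false)) := by
  induction sw with
  | nil => intro S d h; exact h
  | cons w ws ih =>
      intro S d h
      rw [List.foldl_cons, PySem.Set.update_cons]
      have hkeys : d.keys = S := by
        simp [PySem.Dict.keys, h, Function.comp_def]
      by_cases hmem : w ∈ S
      · have hc : d.contains w = true := by
          rw [PySem.Dict.contains_eq_decide_mem_keys, hkeys]; simpa using hmem
        have hadd : PySem.Set.add S w = S := by
          simp [PySem.Set.add, hmem]
        rw [hadd]
        apply ih S
        rw [PySem.Dict.items_insert_of_contains _ _ hc, h, List.map_map]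
        apply List.map_congr_left
        intro k _
        by_cases hk : k = w <;> simp [hk]
      · have hc : d.contains w = false := by
          rw [PySem.Dict.contains_eq_decide_mem_keys, hkeys]; simpa using hmem
        have hadd : PySem.Set.add S w = S ++ [w] := by
          simp [PySem.Set.add, hmem]
        rw [hadd]
        apply ih (S ++ [w])
        rw [PySem.Dict.items_insert_of_not_contains _ _ hc, h]
        simp

-- token loop: each token claims an entry (flag true) only if its word is new;
-- the appended tail is exactly the first occurrences of non-stopword tokens
theorem pv_token_items (SW : List String) (toks : List String) :
    ∀ (s : List String) (d : PySem.Dict String Bool),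
      d.items = SW.map (fun w => (w, false))
        ++ (s.filter (fun x => !SW.contains x)).map (fun t => (t, true)) →
      (toks.foldl (fun d t => PySem.Dict.setdefault d t true) d).items
        = SW.map (fun w => (w, false))
          ++ ((toks.foldl PySem.Set.add s).filter (fun x => !SW.contains x)).map
              (fun t => (t, true)) := by
  induction toks with
  | nil => intro s d h; simpa using h
  | cons t ts ih =>
      intro s d h
      have e1 : ∀ (l : List String), (l.map (fun w => (w, false))).map
          (fun x : String × Bool => x.1) = l := by intro l; simp [Function.comp_def]
      have e2 : ∀ (l : List String), (l.map (fun t => (t, true))).map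
          (fun x : String × Bool => x.1) = l := by intro l; simp [Function.comp_def]
      have hkeys : d.keys = SW ++ s.filter (fun x => !SW.contains x) := by
        simp only [PySem.Dict.keys, h, List.map_append, e1, e2]
      have hdc : d.contains t
          = decide (t ∈ SW ++ s.filter (fun x => !SW.contains x)) :=
        by rw [PySem.Dict.contains_eq_decide_mem_keys, hkeys]
      rw [List.foldl_cons, List.foldl_cons]
      by_cases hsw : t ∈ SW
      · have hswc : SW.contains t = true := by simpa using hsw
        have hc : d.contains t = true := by rw [hdc]; simp [hsw]
        rw [PySem.Dict.setdefault_of_contains _ _ hc]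
        have hfadd : (PySem.Set.add s t).filter (fun x => !SW.contains x)
            = s.filter (fun x => !SW.contains x) := by
          unfold PySem.Set.add
          by_cases hs : PySem.Set.contains s t = true
          · rw [if_pos hs]
          · rw [if_neg hs, List.filter_append]
            simp [hsw]
        exact ih (PySem.Set.add s t) d (by rw [hfadd]; exact h)
      · by_cases hs : t ∈ s
        · have hc : d.contains t = true := by
            rw [hdc]; simp [List.mem_filter, hs, hsw]
          rw [PySem.Dict.setdefault_of_contains _ _ hc]
          have hadd : PySem.Set.add s t = s := by
            unfold PySem.Set.add
            rw [if_pos (by simp [hs])]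
          rw [hadd]
          exact ih s d h
        · have hc : d.contains t = false := by
            rw [hdc]; simp [List.mem_filter, hs, hsw]
          rw [PySem.Dict.setdefault_of_not_contains _ _ hc]
          have hadd : PySem.Set.add s t = s ++ [t] := by
            unfold PySem.Set.add
            rw [if_neg (by simp [hs])]
          rw [hadd]
          apply ih (s ++ [t]) (d.insert t true)
          rw [PySem.Dict.items_insert_of_not_contains _ _ hc, h, List.filter_append]
          have hft : List.filter (fun x => !SW.contains x) [t] = [t] := by simp [hsw]
          rw [hft, List.map_append, List.append_assoc]
          simp

-- B's nested token loops are one fold over the flattened token stream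
theorem pv_nested_setdefault (data : List (String × List String)) :
    ∀ d : PySem.Dict String Bool,
      data.foldl (fun d p => p.2.foldl (fun d t => PySem.Dict.setdefault d t true) d) d
        = (data.flatMap (fun p => p.2)).foldl (fun d t => PySem.Dict.setdefault d t true) d := by
  induction data with
  | nil => intro d; simp
  | cons p ps ih => intro d; simp [List.foldl_cons, List.foldl_append, ih]

-- reading the vocabulary off the final status dict keeps exactly the
-- True-flagged keys
theorem pv_readoff (SW F : List String) :
    ((SW.map (fun w => (w, false)) ++ F.map (fun t => (t, true))).filter
        (fun kv => kv.2)).map (fun kv => kv.1) = F := by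
  rw [List.filter_append, List.filter_map, List.filter_map, List.map_append,
    List.map_map, List.map_map,
    show ((fun kv : String × Bool => kv.2) ∘ fun w => (w, false)) = (fun _ => false) from rfl,
    show ((fun kv : String × Bool => kv.2) ∘ fun t => (t, true)) = (fun _ => true) from rfl,
    show ((fun kv : String × Bool => kv.1) ∘ fun t => (t, true)) = (fun t => t) from rfl]
  simp

-- ===== VERDICT (by name: the statement is the Claim_ definition above) =====
theorem getVocab_old_spec : Claim_equal_getVocab_old := by
  intro data stopwords _
  unfold Spec_getVocab_old
  simp only [getVocab_old, getVocab_old_alt]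
  rw [pv_nested_setdefault, pv_concat_flat, List.nil_append]
  have hseed := pv_seed_items stopwords [] PySem.Dict.empty rfl
  rw [PySem.Set.update_nil_left] at hseed
  have hitems := pv_token_items (PySem.Set.ofList stopwords)
    (data.flatMap (fun p => p.2)) [] _ (by rw [hseed]; simp)
  rw [hitems, ← PySem.Set.ofList_eq_foldl, pv_readoff,
    PySem.Set.ofList_eq_self_of_nodup _
      ((PySem.Set.nodup_ofList _).filter _),
    pv_foldl_discard]
  apply List.filter_congr
  intro y _
  rw [pv_contains_ofList]
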